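-- pv_equiv track=rewrite | github.com/Max123250/cdoe-python | 蓝桥杯/202104省赛/赛时文件/新5（密室）.py | f
-- ===== SOURCE A (Python) =====
-- def f(n1,n2,y):
--     w = 2
--     feibo = [0]*(y+1)
--     feibo[0] = 1
--     feibo[1] = 1
--     while w < y:
--         if w == n1 or w == n2:
--             feibo[w] = 0
--         else:
--             feibo[w] = feibo[w-1] + feibo[w-2]
--         w += 1
--     return feibo[y-1]
-- ===== SOURCE B (Python) =====
-- def _matmul(x, y):
--     a, b, c, d = x
--     e, f2, g, h = y
--     return (a*e + b*g, a*f2 + b*h, c*e + d*g, c*f2 + d*h)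
--
-- def _matpow(m):
--     # [[1,1],[1,0]]^m by binary exponentiation (identity for m <= 0)
--     r = (1, 0, 0, 1)
--     b = (1, 1, 1, 0)
--     while m > 0:
--         if m & 1:
--             r = _matmul(r, b)
--         b = _matmul(b, b)
--         m >>= 1
--     return r
--
-- def _advance(p, c, m):
--     # advance the state (prev, cur) by m steps of cur' = cur + prev
--     a, b, c2, d = _matpow(m)
--     return (c2*c + d*p, a*c + b*p)
--
-- def f(n1, n2, y):
--     if y == 1:
--         return 1
--     zeros = sorted({z for z in (n1, n2) if 2 <= z < y})
--     p, c = 1, 1   # (feibo[pos-1], feibo[pos]) at pos = 1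
--     pos = 1
--     for z in zeros:
--         p, c = _advance(p, c, z - 1 - pos)
--         p, c = c, 0
--         pos = z
--     p, c = _advance(p, c, (y - 1) - pos)
--     return c
-- ===== Notes on version B (the rewrite author's own statement) =====
-- stated objective: faster
-- what changed: A fills an O(y) array with the recurrence one cell at a time; B splits [1, y-1] at the (at most two) zeroed positions and jumps across each segment with binary matrix exponentiation of [[1,1],[1,0]].
import Mathlib
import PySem

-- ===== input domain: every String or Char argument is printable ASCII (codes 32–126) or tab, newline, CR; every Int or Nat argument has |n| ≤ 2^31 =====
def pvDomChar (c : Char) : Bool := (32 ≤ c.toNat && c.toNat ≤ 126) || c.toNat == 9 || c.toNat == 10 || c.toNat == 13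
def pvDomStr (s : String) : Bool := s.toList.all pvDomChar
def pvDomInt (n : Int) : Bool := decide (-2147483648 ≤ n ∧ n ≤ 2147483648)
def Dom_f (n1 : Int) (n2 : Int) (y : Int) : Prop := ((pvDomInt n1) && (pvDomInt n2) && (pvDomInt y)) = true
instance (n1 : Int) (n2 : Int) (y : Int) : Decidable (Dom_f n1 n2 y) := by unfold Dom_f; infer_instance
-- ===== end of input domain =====

-- B replaces A's O(y) array fill by fast matrix exponentiation over the segments between the
-- (at most two) zeroed positions; equal return values are proved for all y ≥ 1 (A raises IndexError for y ≤ 0).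

-- ===== PORT A =====
-- Python's list with in-place index assignment is ported as Array (O(1) writes); indexing is
-- exact for 0 ≤ i < len — the only out-of-range accesses are the initial feibo[0]/feibo[1]
-- writes when y ≤ 0, where Python raises IndexError: those inputs are outside Pre_f.
def f (n1 : Int) (n2 : Int) (y : Int) : Int :=
  let feibo : Array Int := Array.replicate (y + 1).toNat 0    -- feibo = [0]*(y+1)
  let feibo := feibo.setIfInBounds 0 1                        -- feibo[0] = 1  (raises iff y ≤ -1: outside Pre_f)
  let feibo := feibo.setIfInBounds 1 1                        -- feibo[1] = 1  (raises iff y ≤ 0: outside Pre_f)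
  let feibo := (PySem.List.pyRange 2 y 1).foldl               -- while w < y, w from 2
    (fun fb w =>
      if w = n1 ∨ w = n2 then fb.setIfInBounds w.toNat 0
      else fb.setIfInBounds w.toNat (fb.getD (w - 1).toNat 0 + fb.getD (w - 2).toNat 0))
    feibo
  feibo.getD (y - 1).toNat 0                                  -- return feibo[y-1]

-- ===== PORT B =====
def matmulB (x y : Int × Int × Int × Int) : Int × Int × Int × Int :=
  (x.1 * y.1 + x.2.1 * y.2.2.1, x.1 * y.2.1 + x.2.1 * y.2.2.2,
   x.2.2.1 * y.1 + x.2.2.2 * y.2.2.1, x.2.2.1 * y.2.1 + x.2.2.2 * y.2.2.2)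

-- the 'while m > 0' square-and-multiply loop of _matpow (fuel = m is a totality guard only:
-- m at least halves each turn, so fuel ≥ m never runs out)
def matpowLoop : Int × Int × Int × Int → Int × Int × Int × Int → Nat → Nat → Int × Int × Int × Int
  | r, _, _, 0 => r
  | r, b, m, fuel + 1 =>
    if m = 0 then r
    else matpowLoop (if m % 2 = 1 then matmulB r b else r) (matmulB b b) (m / 2) fuel

def matpowB (m : Int) : Int × Int × Int × Int :=
  matpowLoop (1, 0, 0, 1) (1, 1, 1, 0) m.toNat m.toNat   -- loop body never runs for m ≤ 0, as in Python

def advanceB (p c m : Int) : Int × Int :=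
  let M := matpowB m
  (M.2.2.1 * c + M.2.2.2 * p, M.1 * c + M.2.1 * p)

def f_alt (n1 : Int) (n2 : Int) (y : Int) : Int :=
  if y = 1 then 1
  else
    let zeros := PySem.List.sorted
      (PySem.Set.ofList (([n1, n2]).filter (fun z => decide (2 ≤ z ∧ z < y)))) (fun z => z) false
    let st := zeros.foldl
      (fun (st : Int × Int × Int) z =>
        let pc := advanceB st.1 st.2.1 (z - 1 - st.2.2)
        (pc.2, 0, z))
      ((1 : Int), (1 : Int), (1 : Int))
    (advanceB st.1 st.2.1 ((y - 1) - st.2.2)).2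

-- ===== PRECONDITION & SPEC =====
-- A raises IndexError for y ≤ 0 (feibo[1] = 1 on a list of length ≤ 1); exactly those inputs are excluded.
def Pre_f (n1 : Int) (n2 : Int) (y : Int) : Prop := 1 ≤ y
instance (n1 : Int) (n2 : Int) (y : Int) : Decidable (Pre_f n1 n2 y) := by unfold Pre_f; infer_instance
def pvWitness_f : Int × Int × Int := (3, 5, 10)

def Spec_f (n1 : Int) (n2 : Int) (y : Int) (out : Int) : Prop := out = f_alt n1 n2 y
instance (n1 : Int) (n2 : Int) (y : Int) (out : Int) : Decidable (Spec_f n1 n2 y out) := by unfold Spec_f; infer_instance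

-- ===== CLAIM (what is proved, stated in full; the proofs are below) =====
def Claim_equal_f : Prop := ∀ (n1 : Int) (n2 : Int) (y : Int), Dom_f n1 n2 y → Pre_f n1 n2 y → Spec_f n1 n2 y (f n1 n2 y)

-- ===== LEMMAS AND PROOFS =====

-- the mathematical sequence both programs compute: feibo[i] as a function of i
def g (n1 n2 : Int) : Nat → Int
  | 0 => 1
  | 1 => 1
  | (n + 2) => if ((n : Int) + 2 = n1 ∨ (n : Int) + 2 = n2) then 0 else g n1 n2 (n + 1) + g n1 n2 n

theorem g_eq_zero (n1 n2 : Int) (i : Nat) (h2 : 2 ≤ i) (hz : (i : Int) = n1 ∨ (i : Int) = n2) :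
    g n1 n2 i = 0 := by
  obtain ⟨n, rfl⟩ : ∃ n, i = n + 2 := ⟨i - 2, by omega⟩
  have : ((n : Int) + 2 = n1 ∨ (n : Int) + 2 = n2) := by push_cast at hz ⊢; omega
  simp [g, this]

theorem g_rec (n1 n2 : Int) (n : Nat) (hz : ¬((n : Int) + 2 = n1 ∨ (n : Int) + 2 = n2)) :
    g n1 n2 (n + 2) = g n1 n2 (n + 1) + g n1 n2 n := by
  simp [g, hz]

-- ---- B-side algebra: the binary-power loop computes matrix powers, powers act as iterated steps ----

def mpowB (b : Int × Int × Int × Int) : Nat → Int × Int × Int × Int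
  | 0 => (1, 0, 0, 1)
  | n + 1 => matmulB (mpowB b n) b

theorem matmulB_one_left (x : Int × Int × Int × Int) : matmulB (1, 0, 0, 1) x = x := by
  obtain ⟨a, b, c, d⟩ := x; simp [matmulB]

theorem matmulB_one_right (x : Int × Int × Int × Int) : matmulB x (1, 0, 0, 1) = x := by
  obtain ⟨a, b, c, d⟩ := x; simp [matmulB]

theorem matmulB_assoc (x y z : Int × Int × Int × Int) :
    matmulB (matmulB x y) z = matmulB x (matmulB y z) := by
  obtain ⟨a, b, c, d⟩ := x; obtain ⟨e, f, g, h⟩ := y; obtain ⟨p, q, r, s⟩ := z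
  simp [matmulB, Prod.ext_iff]
  refine ⟨by ring, by ring, by ring, by ring⟩

theorem matmulB_mpowB_comm (b : Int × Int × Int × Int) (n : Nat) :
    matmulB b (mpowB b n) = matmulB (mpowB b n) b := by
  induction n with
  | zero => simp [mpowB, matmulB_one_left, matmulB_one_right]
  | succ n ih => simp [mpowB, ← matmulB_assoc, ih]

theorem mpowB_two_mul (b : Int × Int × Int × Int) (n : Nat) :
    mpowB (matmulB b b) n = mpowB b (2 * n) := by
  induction n with
  | zero => rfl
  | succ n ih =>
    have h2 : 2 * (n + 1) = (2 * n + 1) + 1 := by omega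
    simp [mpowB, ih, matmulB_assoc]

theorem matpowLoop_eq (fuel : Nat) : ∀ (r b : Int × Int × Int × Int) (m : Nat), m ≤ fuel →
    matpowLoop r b m fuel = matmulB r (mpowB b m) := by
  induction fuel with
  | zero =>
    intro r b m hm
    interval_cases m
    simp [matpowLoop, mpowB, matmulB_one_right]
  | succ fuel ih =>
    intro r b m hm
    by_cases h0 : m = 0
    · subst h0; simp [matpowLoop, mpowB, matmulB_one_right]
    · have hle : m / 2 ≤ fuel := by omega
      rw [show matpowLoop r b m (fuel + 1)
            = matpowLoop (if m % 2 = 1 then matmulB r b else r) (matmulB b b) (m / 2) fuel by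
          simp [matpowLoop, h0]]
      rw [ih _ _ _ hle, mpowB_two_mul]
      by_cases hpar : m % 2 = 1
      · have hm2 : m = 2 * (m / 2) + 1 := by omega
        simp only [hpar, if_pos]
        rw [matmulB_assoc, matmulB_mpowB_comm]
        rw [show matmulB (mpowB b (2 * (m / 2))) b = mpowB b (2 * (m / 2) + 1) from rfl, ← hm2]
      · have hm2 : m = 2 * (m / 2) := by omega
        simp only [hpar, ite_false, ← hm2]

theorem matpowB_eq (m : Int) : matpowB m = mpowB (1, 1, 1, 0) m.toNat := by
  rw [matpowB, matpowLoop_eq m.toNat _ _ m.toNat le_rfl, matmulB_one_left]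

def applyMB (M : Int × Int × Int × Int) (v : Int × Int) : Int × Int :=
  (M.1 * v.1 + M.2.1 * v.2, M.2.2.1 * v.1 + M.2.2.2 * v.2)

def stepv (v : Int × Int) : Int × Int := (v.1 + v.2, v.1)

theorem applyMB_matmulB (X Y : Int × Int × Int × Int) (v : Int × Int) :
    applyMB (matmulB X Y) v = applyMB X (applyMB Y v) := by
  obtain ⟨a, b, c, d⟩ := X; obtain ⟨e, f, g, h⟩ := Y; obtain ⟨u, w⟩ := v
  simp [applyMB, matmulB, Prod.ext_iff]
  constructor <;> ring

theorem applyMB_mpowB (m : Nat) (v : Int × Int) :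
    applyMB (mpowB (1, 1, 1, 0) m) v = stepv^[m] v := by
  induction m generalizing v with
  | zero => simp [mpowB, applyMB]
  | succ m ih =>
    rw [show mpowB (1, 1, 1, 0) (m + 1) = matmulB (mpowB (1, 1, 1, 0) m) (1, 1, 1, 0) from rfl]
    rw [applyMB_matmulB, Function.iterate_succ_apply]
    rw [show applyMB (1, 1, 1, 0) v = stepv v by obtain ⟨a, b⟩ := v; simp [applyMB, stepv], ih]

theorem advanceB_eq (p c m : Int) :
    advanceB p c m = ((stepv^[m.toNat] (c, p)).2, (stepv^[m.toNat] (c, p)).1) := by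
  rw [show ((stepv^[m.toNat] (c, p)).2, (stepv^[m.toNat] (c, p)).1)
        = ((applyMB (mpowB (1, 1, 1, 0) m.toNat) (c, p)).2,
           (applyMB (mpowB (1, 1, 1, 0) m.toNat) (c, p)).1) by rw [applyMB_mpowB]]
  rw [advanceB, matpowB_eq]
  rfl

-- stepping m times through a segment with no zeroed position advances g by m
theorem stepv_seg (n1 n2 : Int) (i m : Nat)
    (hz : ∀ j : Nat, i + 1 < j → j ≤ i + 1 + m → ¬((j : Int) = n1 ∨ (j : Int) = n2)) :
    stepv^[m] (g n1 n2 (i + 1), g n1 n2 i) = (g n1 n2 (i + 1 + m), g n1 n2 (i + m)) := by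
  induction m with
  | zero => simp
  | succ m ih =>
    rw [Function.iterate_succ_apply']
    rw [ih (fun j h1 h2 => hz j h1 (by omega))]
    have hnz : ¬(((i + m : Nat) : Int) + 2 = n1 ∨ ((i + m : Nat) : Int) + 2 = n2) := by
      have := hz (i + m + 2) (by omega) (by omega)
      push_cast at this ⊢; omega
    have hg : g n1 n2 (i + m + 2) = g n1 n2 (i + m + 1) + g n1 n2 (i + m) := g_rec n1 n2 _ hnz
    rw [show i + 1 + (m + 1) = i + m + 2 by omega, show i + (m + 1) = i + m + 1 by omega,
        show i + 1 + m = i + m + 1 by omega, hg]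
    rfl

-- ---- A-side: the array fill computes g at every index below the write pointer ----

def stepA (n1 n2 : Int) (fb : Array Int) (w : Int) : Array Int :=
  if w = n1 ∨ w = n2 then fb.setIfInBounds w.toNat 0
  else fb.setIfInBounds w.toNat (fb.getD (w - 1).toNat 0 + fb.getD (w - 2).toNat 0)

def initA (y : Int) : Array Int :=
  ((Array.replicate (y + 1).toNat (0 : Int)).setIfInBounds 0 1).setIfInBounds 1 1

theorem f_eq_fold (n1 n2 y : Int) :
    f n1 n2 y = ((PySem.List.pyRange 2 y 1).foldl (stepA n1 n2) (initA y)).getD (y - 1).toNat 0 := rfl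

theorem size_stepA (n1 n2 : Int) (fb : Array Int) (w : Int) :
    (stepA n1 n2 fb w).size = fb.size := by
  unfold stepA; split_ifs <;> exact Array.size_setIfInBounds

theorem size_foldA (n1 n2 : Int) (l : List Int) : ∀ fb : Array Int,
    (l.foldl (stepA n1 n2) fb).size = fb.size := by
  induction l with
  | nil => intro fb; rfl
  | cons x l ih => intro fb; rw [List.foldl_cons, ih, size_stepA]

theorem getD_set_self (xs : Array Int) (n : Nat) (v d : Int) (h : n < xs.size) :
    (xs.setIfInBounds n v).getD n d = v := by
  rw [Array.getD_eq_getD_getElem?,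
      Array.getElem?_eq_getElem (by simpa using h), Array.getElem_setIfInBounds_self]
  rfl

theorem getD_set_ne (xs : Array Int) (n m : Nat) (v d : Int) (h : n ≠ m) :
    (xs.setIfInBounds n v).getD m d = xs.getD m d := by
  rw [Array.getD_eq_getD_getElem?, Array.getElem?_setIfInBounds_ne h, ← Array.getD_eq_getD_getElem?]

theorem initA_size (y : Int) : (initA y).size = (y + 1).toNat := by
  simp [initA]

theorem initA_getD_lt_two (n1 n2 y : Int) (hy : 1 ≤ y) (i : Nat) (hi : i < 2) :
    (initA y).getD i 0 = g n1 n2 i := by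
  have hlen : (Array.replicate (y + 1).toNat (0 : Int)).size = (y + 1).toNat := by
    simp
  unfold initA
  interval_cases i
  · rw [getD_set_ne _ _ _ _ _ (by omega), getD_set_self]
    · rfl
    · rw [hlen]; omega
  · rw [getD_set_self]
    · rfl
    · rw [Array.size_setIfInBounds, hlen]; omega

theorem Afold_val (n1 n2 y : Int) (hy : 1 ≤ y) : ∀ (k : Nat), 2 + (k : Int) ≤ y →
    ∀ i : Nat, (i : Int) < 2 + (k : Int) →
    ((PySem.List.pyRange 2 (2 + (k : Int)) 1).foldl (stepA n1 n2) (initA y)).getD i 0 = g n1 n2 i := by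
  intro k
  induction k with
  | zero =>
    intro _ i hi
    rw [show (2 + ((0 : Nat) : Int)) = 2 by norm_num, PySem.List.pyRange_one_eq_nil (by norm_num)]
    exact initA_getD_lt_two n1 n2 y hy i (by omega)
  | succ k ih =>
    intro hky i hi
    have hk : 2 + (k : Int) ≤ y := by push_cast at hky; omega
    have hsplit : PySem.List.pyRange 2 (2 + ((k + 1 : Nat) : Int)) 1
        = PySem.List.pyRange 2 (2 + (k : Int)) 1 ++ [2 + (k : Int)] := by
      rw [show (2 + ((k + 1 : Nat) : Int)) = (2 + (k : Int)) + 1 by push_cast; ring]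
      exact PySem.List.pyRange_one_succ_right (by omega)
    rw [hsplit, List.foldl_append]
    set L := (PySem.List.pyRange 2 (2 + (k : Int)) 1).foldl (stepA n1 n2) (initA y) with hL
    have hlenL : L.size = (y + 1).toNat := by rw [hL, size_foldA, initA_size]
    have hwN : (2 + (k : Int)).toNat = k + 2 := by omega
    have hwlen : k + 2 < L.size := by omega
    rw [List.foldl_cons, List.foldl_nil]
    have hiN : i ≤ k + 2 := by push_cast at hi; omega
    unfold stepA
    split_ifs with hzero
    · rw [hwN]
      by_cases hik : i = k + 2
      · subst hik
        rw [getD_set_self _ _ _ _ hwlen]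
        exact (g_eq_zero n1 n2 (k + 2) (by omega)
          (by push_cast; convert hzero using 2 <;> ring)).symm
      · rw [getD_set_ne _ _ _ _ _ (by omega)]
        exact ih hk i (by omega)
    · rw [hwN]
      have hg1 : L.getD (2 + (k : Int) - 1).toNat 0 = g n1 n2 (k + 1) := by
        rw [show (2 + (k : Int) - 1).toNat = k + 1 by omega]
        exact ih hk (k + 1) (by omega)
      have hg2 : L.getD (2 + (k : Int) - 2).toNat 0 = g n1 n2 k := by
        rw [show (2 + (k : Int) - 2).toNat = k by omega]
        exact ih hk k (by omega)
      rw [hg1, hg2]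
      by_cases hik : i = k + 2
      · subst hik
        rw [getD_set_self _ _ _ _ hwlen]
        refine (g_rec n1 n2 k ?_).symm
        intro h; exact hzero (by omega)
      · rw [getD_set_ne _ _ _ _ _ (by omega)]
        exact ih hk i (by omega)

theorem f_eq_g (n1 n2 y : Int) (hy : 1 ≤ y) : f n1 n2 y = g n1 n2 (y - 1).toNat := by
  rw [f_eq_fold]
  by_cases h1 : y = 1
  · subst h1
    rw [PySem.List.pyRange_one_eq_nil (by norm_num), List.foldl_nil]
    rw [show ((1 : Int) - 1).toNat = 0 by norm_num]
    exact initA_getD_lt_two n1 n2 1 (by norm_num) 0 (by norm_num)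
  · have hy2 : 2 ≤ y := by omega
    have hk : y = 2 + (((y - 2).toNat : Nat) : Int) := by omega
    calc ((PySem.List.pyRange 2 y 1).foldl (stepA n1 n2) (initA y)).getD (y - 1).toNat 0
        = ((PySem.List.pyRange 2 (2 + (((y - 2).toNat : Nat) : Int)) 1).foldl (stepA n1 n2)
            (initA y)).getD (y - 1).toNat 0 := by rw [← hk]
      _ = g n1 n2 (y - 1).toNat := Afold_val n1 n2 y hy (y - 2).toNat (by omega) (y - 1).toNat (by omega)

-- ---- B-side: the segment walk over the zeroed positions also computes g ----

def stepB (st : Int × Int × Int) (z : Int) : Int × Int × Int :=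
  ((advanceB st.1 st.2.1 (z - 1 - st.2.2)).2, 0, z)

theorem fold_zeros (n1 n2 y : Int) : ∀ (zs : List Int) (k : Nat) (pos : Int),
    pos = (k : Int) + 1 → pos < y →
    (∀ z ∈ zs, pos < z ∧ (z = n1 ∨ z = n2) ∧ z < y) →
    zs.Pairwise (· < ·) →
    (∀ j : Int, pos < j → j < y → (j = n1 ∨ j = n2) → j ∈ zs) →
    (advanceB (zs.foldl stepB (g n1 n2 k, g n1 n2 (k + 1), pos)).1
              (zs.foldl stepB (g n1 n2 k, g n1 n2 (k + 1), pos)).2.1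
              ((y - 1) - (zs.foldl stepB (g n1 n2 k, g n1 n2 (k + 1), pos)).2.2)).2
      = g n1 n2 (y - 1).toNat := by
  intro zs
  induction zs with
  | nil =>
    intro k pos hpos hposy _ _ hcomplete
    rw [List.foldl_nil]
    rw [advanceB_eq]
    have hm : ((y - 1) - pos).toNat = (y - 1).toNat - (k + 1) := by omega
    have hseg : stepv^[((y - 1) - pos).toNat] (g n1 n2 (k + 1), g n1 n2 k)
        = (g n1 n2 (k + 1 + ((y - 1) - pos).toNat), g n1 n2 (k + ((y - 1) - pos).toNat)) := by
      apply stepv_seg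
      intro j h1 h2 hj
      have hjy : (j : Int) < y := by omega
      have hjp : pos < (j : Int) := by omega
      exact absurd (hcomplete (j : Int) hjp hjy hj) (List.not_mem_nil)
    rw [hseg]
    rw [show k + 1 + ((y - 1) - pos).toNat = (y - 1).toNat by omega]
  | cons z zs ih =>
    intro k pos hpos hposy hmem hpw hcomplete
    rw [List.foldl_cons]
    have hz := hmem z (List.mem_cons_self ..)
    obtain ⟨hzpos, hzzero, hzy⟩ := hz
    have hzs_gt : ∀ w ∈ zs, z < w := (List.pairwise_cons.mp hpw).1
    have hstep : stepB (g n1 n2 k, g n1 n2 (k + 1), pos) z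
        = (g n1 n2 ((z - 1).toNat), 0, z) := by
      unfold stepB
      rw [advanceB_eq]
      have hseg : stepv^[(z - 1 - pos).toNat] (g n1 n2 (k + 1), g n1 n2 k)
          = (g n1 n2 (k + 1 + (z - 1 - pos).toNat), g n1 n2 (k + (z - 1 - pos).toNat)) := by
        apply stepv_seg
        intro j h1 h2 hj
        have hjz : (j : Int) < z := by omega
        have hjy : (j : Int) < y := by omega
        have hjp : pos < (j : Int) := by omega
        have := hcomplete (j : Int) hjp hjy hj
        rcases List.mem_cons.mp this with h | h
        · omega
        · exact absurd (hzs_gt _ h) (by omega)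
      simp only [hseg]
      rw [show k + 1 + (z - 1 - pos).toNat = (z - 1).toNat by omega]
    rw [hstep]
    have hzk : z = (((z - 1).toNat : Nat) : Int) + 1 := by omega
    have hzero : (0 : Int) = g n1 n2 ((z - 1).toNat + 1) := by
      refine (g_eq_zero n1 n2 _ (by omega) ?_).symm
      rcases hzzero with h | h
      · left; push_cast; omega
      · right; push_cast; omega
    rw [hzero]
    exact ih ((z - 1).toNat) z hzk hzy
      (fun w hw => ⟨(hzs_gt w hw), (hmem w (List.mem_cons_of_mem _ hw)).2⟩)
      (List.pairwise_cons.mp hpw).2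
      (fun j hj1 hj2 hj3 => by
        rcases List.mem_cons.mp (hcomplete j (by omega) hj2 hj3) with h | h
        · omega
        · exact h)

theorem f_alt_eq_g (n1 n2 y : Int) (hy : 1 ≤ y) : f_alt n1 n2 y = g n1 n2 (y - 1).toNat := by
  by_cases h1 : y = 1
  · subst h1; rfl
  · have hy2 : 2 ≤ y := by omega
    rw [f_alt, if_neg h1]
    set zeros := PySem.List.sorted
      (PySem.Set.ofList (([n1, n2]).filter (fun z => decide (2 ≤ z ∧ z < y)))) (fun z => z) false
      with hzeros
    have hmem : ∀ z : Int, z ∈ zeros ↔ ((z = n1 ∨ z = n2) ∧ (2 ≤ z ∧ z < y)) := by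
      intro z
      rw [hzeros, PySem.List.mem_sorted, PySem.Set.mem_ofList, List.mem_filter]
      simp only [List.mem_cons, List.not_mem_nil, or_false, decide_eq_true_eq]
    have hpw : zeros.Pairwise (· < ·) := PySem.List.sorted_ofList_pairwise_lt _
    have hfold := fold_zeros n1 n2 y zeros 0 1 (by norm_num) (by omega)
      (fun z hz => by
        have := (hmem z).mp hz
        exact ⟨by omega, this.1, this.2.2⟩)
      hpw
      (fun j hj1 hj2 hj3 => (hmem j).mpr ⟨hj3, by omega, hj2⟩)
    rw [show ((1 : Int), (1 : Int), (1 : Int)) = (g n1 n2 0, g n1 n2 (0 + 1), (1 : Int)) from rfl]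
    rw [show (fun (st : Int × Int × Int) z =>
          let pc := advanceB st.1 st.2.1 (z - 1 - st.2.2)
          ((pc.2 : Int), (0 : Int), z)) = stepB from rfl]
    exact hfold

theorem f_spec : Claim_equal_f := by
  intro n1 n2 y _ hpre
  unfold Spec_f
  rw [f_eq_g n1 n2 y hpre, f_alt_eq_g n1 n2 y hpre]
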